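-- pv_equiv track=rewrite | github.com/blazerzar/advent-of-code | 2020/day_17.py | inactive_around_active
-- ===== SOURCE A (Python) =====
-- from typing import Set, Tuple
--
-- def inactive_around_active(
--         active: Set[Tuple[int, int, int]], x: int, y: int,
--         z: int, w: int, d: int) -> Set[Tuple[int, int, int, int]]:
--     """Return set of inactive cubes around the given cube"""
--     inactive = set()
--     for dx in range(-1, 2):
--         for dy in range(-1, 2):
--             for dz in range(-1, 2):
--                 for dw in ([0] if d == 3 else range(-1, 2)):
--                     if ((dx != 0 or dy != 0 or dz != 0 or dw != 0) and
--                             (x + dx, y + dy, z + dz, w + dw) not in active):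
--                         inactive.add((x + dx, y + dy, z + dz, w + dw))
--     return inactive
-- ===== SOURCE B (Python) =====
-- def inactive_around_active(active, x, y, z, w, d):
--     """Return set of inactive cubes around the given cube"""
--     k = 3 if d == 3 else 4
--     cells = set()
--     for i in range(3 ** k):
--         q = i
--         offsets = [0, 0, 0, 0]
--         for j in range(k - 1, -1, -1):
--             q, r = divmod(q, 3)
--             offsets[j] = r - 1
--         cells.add((x + offsets[0], y + offsets[1], z + offsets[2], w + offsets[3]))
--     cells.discard((x, y, z, w))
--     return cells - active
-- ===== Notes on version B (the rewrite author's own statement) =====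
-- stated objective: alternative
-- what changed: B replaces A's four nested offset loops with a per-cell guard by a single flat loop over range(3**k) that decodes each index into an offset vector via base-3 digits (divmod), builds the whole neighborhood set, and then removes the center with discard and the active cells with one bulk set difference.
import Mathlib
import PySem

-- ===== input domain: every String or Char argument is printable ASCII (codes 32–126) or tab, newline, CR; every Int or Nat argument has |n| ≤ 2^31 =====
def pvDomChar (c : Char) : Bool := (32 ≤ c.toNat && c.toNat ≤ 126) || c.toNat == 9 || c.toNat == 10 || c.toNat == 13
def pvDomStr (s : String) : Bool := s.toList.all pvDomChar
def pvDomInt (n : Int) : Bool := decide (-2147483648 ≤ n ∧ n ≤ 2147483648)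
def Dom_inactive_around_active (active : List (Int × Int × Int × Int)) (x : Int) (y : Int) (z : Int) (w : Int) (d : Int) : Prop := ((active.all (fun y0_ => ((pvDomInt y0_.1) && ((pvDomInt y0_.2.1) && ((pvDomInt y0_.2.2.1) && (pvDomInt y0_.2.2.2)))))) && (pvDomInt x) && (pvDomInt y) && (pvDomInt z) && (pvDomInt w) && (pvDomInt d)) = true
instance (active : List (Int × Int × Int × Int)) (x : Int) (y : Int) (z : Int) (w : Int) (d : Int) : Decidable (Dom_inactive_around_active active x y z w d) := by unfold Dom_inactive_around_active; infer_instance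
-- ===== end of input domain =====

-- B replaces the four nested offset loops by ONE flat loop over range(3**k) that decodes
-- each index into an offset vector by base-3 digits, then removes the center and the
-- active cells with bulk set operations (alternative decomposition; return value only).

-- ===== PORT A =====
def inactive_around_active (active : List (Int × Int × Int × Int)) (x : Int) (y : Int) (z : Int) (w : Int) (d : Int) : List (Int × Int × Int × Int) :=
  (PySem.List.pyRange (-1) 2 1).foldl (fun s dx =>
    (PySem.List.pyRange (-1) 2 1).foldl (fun s dy =>
      (PySem.List.pyRange (-1) 2 1).foldl (fun s dz =>
        (if d = 3 then [(0 : Int)] else PySem.List.pyRange (-1) 2 1).foldl (fun s dw =>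
          if (dx ≠ 0 ∨ dy ≠ 0 ∨ dz ≠ 0 ∨ dw ≠ 0) ∧ (x + dx, y + dy, z + dz, w + dw) ∉ active then
            PySem.Set.add s (x + dx, y + dy, z + dz, w + dw)
          else s) s) s) s)
    ([] : PySem.Set (Int × Int × Int × Int))

-- ===== PORT B =====
-- '3 ** k' with k ∈ {3,4}: '(3 : Int) ^ k.toNat' is exact; 'offsets[j] = r - 1' with the
-- loop index j always a literal-range 0 ≤ j ≤ 3 < len(offsets): 'List.set j.toNat' and
-- 'getD' at literal in-range indices are exact; divmod(q, 3) = (floordiv, mod), 3 ≠ 0.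
def inactive_around_active_alt (active : List (Int × Int × Int × Int)) (x : Int) (y : Int) (z : Int) (w : Int) (d : Int) : List (Int × Int × Int × Int) :=
  let k : Int := if d = 3 then 3 else 4
  let cells : PySem.Set (Int × Int × Int × Int) :=
    (PySem.List.pyRange 0 ((3 : Int) ^ k.toNat) 1).foldl (fun cells i =>
      let st := (PySem.List.pyRange (k - 1) (-1) (-1)).foldl
        (fun (p : Int × List Int) j =>
          (PySem.Int.floordiv p.1 3, p.2.set j.toNat (PySem.Int.mod p.1 3 - 1)))
        (i, [0, 0, 0, 0])
      PySem.Set.add cells (x + st.2.getD 0 0, y + st.2.getD 1 0, z + st.2.getD 2 0, w + st.2.getD 3 0))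
      []
  PySem.Set.diff (PySem.Set.discard cells (x, y, z, w)) active

-- ===== PRECONDITION & SPEC =====
def Spec_inactive_around_active (active : List (Int × Int × Int × Int)) (x : Int) (y : Int) (z : Int) (w : Int) (d : Int) (out : List (Int × Int × Int × Int)) : Prop := out = inactive_around_active_alt active x y z w d
instance (active : List (Int × Int × Int × Int)) (x : Int) (y : Int) (z : Int) (w : Int) (d : Int) (out : List (Int × Int × Int × Int)) : Decidable (Spec_inactive_around_active active x y z w d out) := by unfold Spec_inactive_around_active; infer_instance

-- ===== CLAIM (what is proved, stated in full; the proofs are below) =====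
def Claim_equal_inactive_around_active : Prop := ∀ (active : List (Int × Int × Int × Int)) (x : Int) (y : Int) (z : Int) (w : Int) (d : Int), Dom_inactive_around_active active x y z w d → Spec_inactive_around_active active x y z w d (inactive_around_active active x y z w d)

-- ===== LEMMAS AND PROOFS =====

/-- The offset tuples A ranges over, in A's visiting order, as one flat list. -/
def pvOffs (dws : List Int) : List (Int × Int × Int × Int) :=
  ([-1, 0, 1] : List Int).flatMap (fun dx =>
    ([-1, 0, 1] : List Int).flatMap (fun dy =>
      ([-1, 0, 1] : List Int).flatMap (fun dz =>
        dws.map (fun dw => (dx, dy, dz, dw)))))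

/-- Shift an offset tuple by the center coordinates. -/
def pvF (x y z w : Int) (t : Int × Int × Int × Int) : Int × Int × Int × Int :=
  (x + t.1, y + t.2.1, z + t.2.2.1, w + t.2.2.2)

/-- The base-3 decoding performed by B's inner loop for index `i`. -/
def pvDec (k : Int) (i : Int) : Int × Int × Int × Int :=
  let st := (PySem.List.pyRange (k - 1) (-1) (-1)).foldl
    (fun (p : Int × List Int) j =>
      (PySem.Int.floordiv p.1 3, p.2.set j.toNat (PySem.Int.mod p.1 3 - 1)))
    (i, [0, 0, 0, 0])
  (st.2.getD 0 0, st.2.getD 1 0, st.2.getD 2 0, st.2.getD 3 0)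

/-- Folding `add`-if over elements whose images under `F` are pairwise distinct
    and fresh w.r.t. the accumulator is a filter-map. -/
theorem pv_fold_add_filter {T C : Type} [BEq C] [LawfulBEq C] (F : T → C) (P : T → Prop)
    [DecidablePred P] (l : List T) (acc : List C)
    (hinj : l.Pairwise (fun a b => F a ≠ F b)) (hacc : ∀ t ∈ l, F t ∉ acc) :
    l.foldl (fun s t => if P t then PySem.Set.add s (F t) else s) acc
      = acc ++ (l.filter (fun t => decide (P t))).map F := by
  induction l generalizing acc with
  | nil => simp
  | cons t l ih =>
    rcases List.pairwise_cons.mp hinj with ⟨ht, hl⟩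
    by_cases hP : P t
    · have hfresh : PySem.Set.add acc (F t) = acc ++ [F t] := by
        simp [PySem.Set.add, hacc t (by simp)]
      simp only [List.foldl_cons, if_pos hP, hfresh]
      rw [ih (acc ++ [F t]) hl]
      · simp [hP]
      · intro u hu
        simp only [List.mem_append, List.mem_singleton]
        rintro (h | h)
        · exact hacc u (by simp [hu]) h
        · exact ht u hu h.symm
    · simp only [List.foldl_cons, if_neg hP]
      rw [ih acc hl (fun u hu => hacc u (by simp [hu]))]
      simp [hP]

theorem pv_a_eq (active : List (Int × Int × Int × Int)) (x y z w d : Int) :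
    inactive_around_active active x y z w d
      = (pvOffs (if d = 3 then [0] else [-1, 0, 1])).foldl
          (fun s t =>
            if (t.1 ≠ 0 ∨ t.2.1 ≠ 0 ∨ t.2.2.1 ≠ 0 ∨ t.2.2.2 ≠ 0) ∧
                 pvF x y z w t ∉ active then
              PySem.Set.add s (pvF x y z w t)
            else s) [] := by
  have hr : PySem.List.pyRange (-1) 2 1 = [-1, 0, 1] := by decide
  simp only [inactive_around_active, pvOffs, pvF, hr, List.foldl_flatMap, List.foldl_map]

theorem pv_main (active : List (Int × Int × Int × Int)) (x y z w : Int) (dws : List Int)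
    (hnd : (pvOffs dws).Nodup) :
    (pvOffs dws).foldl
        (fun s t =>
          if (t.1 ≠ 0 ∨ t.2.1 ≠ 0 ∨ t.2.2.1 ≠ 0 ∨ t.2.2.2 ≠ 0) ∧
               pvF x y z w t ∉ active then
            PySem.Set.add s (pvF x y z w t)
          else s) []
      = PySem.Set.diff
          (PySem.Set.diff
            (PySem.Set.ofList ((pvOffs dws).map (pvF x y z w)))
            [(x, y, z, w)]) active := by
  have hFinj : Function.Injective (pvF x y z w) := by
    intro a b hab
    simp only [pvF, Prod.mk.injEq] at hab
    obtain ⟨h1, h2, h3, h4⟩ := hab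
    exact Prod.ext (by omega) (Prod.ext (by omega) (Prod.ext (by omega) (by omega)))
  have hmapnd : ((pvOffs dws).map (pvF x y z w)).Nodup := hnd.map hFinj
  have hfold := pv_fold_add_filter (pvF x y z w)
    (fun t : Int × Int × Int × Int => (t.1 ≠ 0 ∨ t.2.1 ≠ 0 ∨ t.2.2.1 ≠ 0 ∨ t.2.2.2 ≠ 0) ∧
      pvF x y z w t ∉ active)
    (pvOffs dws) [] (hnd.imp (fun h hFe => h (hFinj hFe))) (by simp)
  simp only [List.nil_append] at hfold
  refine hfold.trans ?_
  rw [PySem.Set.ofList_eq_self_of_nodup _ hmapnd]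
  simp only [PySem.Set.diff, List.filter_filter, List.filter_map]
  refine congrArg _ ?_
  refine (List.filter_congr ?_).symm
  intro t _
  rw [Bool.eq_iff_iff]
  simp only [Function.comp_def, Bool.and_eq_true, Bool.not_eq_true',
    PySem.Set.contains_eq_listContains, List.contains_eq_mem, decide_eq_false_iff_not,
    decide_eq_true_eq, List.mem_singleton, pvF, Prod.mk.injEq]
  constructor
  · rintro ⟨hna, hnc⟩
    refine ⟨?_, hna⟩
    by_contra hall
    push Not at hall
    exact hnc ⟨by omega, by omega, by omega, by omega⟩
  · rintro ⟨h1, h2⟩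
    refine ⟨h2, fun he => ?_⟩
    obtain ⟨e1, e2, e3, e4⟩ := he
    rcases h1 with h | h | h | h <;> omega

/-- `discard` is `diff` with the singleton. -/
theorem pv_discard_eq_diff {C : Type} [BEq C] (s : PySem.Set C) (c : C) :
    PySem.Set.discard s c = PySem.Set.diff s [c] := by
  simp [PySem.Set.discard, PySem.Set.diff, PySem.Set.contains, List.contains_cons]

/-- B's port, re-expressed in the same normal form as A's. -/
theorem pv_b_eq (active : List (Int × Int × Int × Int)) (x y z w d : Int) :
    inactive_around_active_alt active x y z w d
      = PySem.Set.diff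
          (PySem.Set.diff
            (PySem.Set.ofList ((pvOffs (if d = 3 then [0] else [-1, 0, 1])).map (pvF x y z w)))
            [(x, y, z, w)]) active := by
  have hmap : (PySem.List.pyRange 0 ((3 : Int) ^ ((if d = 3 then (3 : Int) else 4)).toNat) 1).map
      (pvDec (if d = 3 then 3 else 4)) = pvOffs (if d = 3 then [0] else [-1, 0, 1]) := by
    by_cases h : d = 3
    · simp only [h, if_true]; decide
    · simp only [if_neg h]; decide
  have hbody : inactive_around_active_alt active x y z w d
      = PySem.Set.diff
          (PySem.Set.discard
            ((PySem.List.pyRange 0 ((3 : Int) ^ ((if d = 3 then (3 : Int) else 4)).toNat) 1).foldl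
              (fun s i => PySem.Set.add s (pvF x y z w (pvDec (if d = 3 then 3 else 4) i))) [])
            (x, y, z, w)) active := rfl
  have h1 : ∀ (l : List Int),
      l.foldl (fun s i => PySem.Set.add s (pvF x y z w (pvDec (if d = 3 then 3 else 4) i))) []
        = (l.map (pvDec (if d = 3 then 3 else 4))).foldl
            (fun s t => PySem.Set.add s (pvF x y z w t)) [] := by
    intro l; rw [List.foldl_map]
  have h2 : ∀ (l : List (Int × Int × Int × Int)),
      l.foldl (fun s t => PySem.Set.add s (pvF x y z w t)) []
        = PySem.Set.ofList (l.map (pvF x y z w)) := by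
    intro l; rw [PySem.Set.ofList_eq_foldl, List.foldl_map]
  rw [hbody, h1, hmap, h2, pv_discard_eq_diff]

-- ===== VERDICT (by name: the statement is the Claim_ definition above) =====
theorem inactive_around_active_spec : Claim_equal_inactive_around_active := by
  intro active x y z w d _
  unfold Spec_inactive_around_active
  rw [pv_b_eq, pv_a_eq]
  have hnd : (pvOffs (if d = 3 then [0] else [-1, 0, 1])).Nodup := by
    by_cases h : d = 3 <;> simp only [h, if_true, if_false] <;> decide
  rw [pv_main active x y z w _ hnd]
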